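-- pv_equiv track=rewrite | github.com/sonsoowon/CodingTest | Implement/test/8.py | solution
-- ===== SOURCE A (Python) =====
-- def solution(string):
--     sorted_str = sorted(string)
--     nums = []
--     for c in sorted_str:
--         # 오름차순으로 정렬된 리스트에서 처음 문자가 나타날 때
--         # 모든 숫자를 확인했으므로 반복문을 탈출한다
--         if ord(c) > 57:
--             break
--         nums.append(int(c))
--
--     return ''.join(sorted_str[len(nums):]) + str(sum(nums))
-- ===== SOURCE B (Python) =====
-- def solution(string):
--     total = 0
--     letters = []
--     for c in string:
--         if c <= '9':
--             total += int(c)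
--         else:
--             letters.append(c)
--     return ''.join(sorted(letters)) + str(total)
-- ===== Notes on version B (the rewrite author's own statement) =====
-- stated objective: simpler
-- what changed: Single pass over the unsorted string partitioning chars into a running digit total and a letters list (no full sort, no break-on-first-letter scan of a sorted copy); only the letters are sorted at the end.
import Mathlib
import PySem

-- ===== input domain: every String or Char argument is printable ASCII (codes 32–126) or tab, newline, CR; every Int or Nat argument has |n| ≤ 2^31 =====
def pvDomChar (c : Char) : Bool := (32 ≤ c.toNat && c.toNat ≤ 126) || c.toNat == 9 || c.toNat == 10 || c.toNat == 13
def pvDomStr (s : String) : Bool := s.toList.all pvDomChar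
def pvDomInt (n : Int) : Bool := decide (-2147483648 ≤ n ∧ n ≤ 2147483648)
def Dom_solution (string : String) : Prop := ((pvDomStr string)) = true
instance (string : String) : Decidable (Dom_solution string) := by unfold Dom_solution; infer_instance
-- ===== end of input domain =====

-- B partitions the string in one pass (running digit total + letters list) and sorts only the
-- letters, instead of sorting everything and scanning the sorted copy; objective: simpler.

-- ===== PORT A =====
-- int(c): exact for '0'..'9'; for other chars Python raises ValueError — those inputs are
-- excluded by Pre_solution, the .getD 0 default is never reached inside Pre_.
def pvIntC (c : Char) : Int := (PySem.Int.ofStr? (String.mk [c])).getD 0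

-- the for-loop over sorted_str with the break at ord(c) > 57, accumulating nums
def pvNumsA : List Char → List Int
  | [] => []
  | c :: cs => if 57 < c.toNat then [] else pvIntC c :: pvNumsA cs

def solution (string : String) : String :=
  let sorted_str := PySem.List.sorted string.toList (fun c => c) false
  let nums := pvNumsA sorted_str
  String.mk (sorted_str.drop nums.length) ++ PySem.Int.toStr nums.sum

-- ===== PORT B =====
-- one loop iteration: if c <= '9' add int(c) to total, else append c to letters
def pvStepB (acc : Int × List Char) (c : Char) : Int × List Char :=
  if c ≤ '9' then (acc.1 + pvIntC c, acc.2) else (acc.1, acc.2 ++ [c])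

def solution_alt (string : String) : String :=
  let r := string.toList.foldl pvStepB (0, [])
  String.mk (PySem.List.sorted r.2 (fun c => c) false) ++ PySem.Int.toStr r.1

-- ===== PRECONDITION & SPEC =====
-- Pre_ excludes exactly the inputs on which Python A raises: any char below '0' makes
-- int(c) raise ValueError on the head of the sorted list (B raises there too).
def Pre_solution (string : String) : Prop :=
  (string.toList.all (fun c => 48 ≤ c.toNat)) = true
instance (string : String) : Decidable (Pre_solution string) := by unfold Pre_solution; infer_instance

def pvWitness_solution : String := "ba21"

def Spec_solution (string : String) (out : String) : Prop := out = solution_alt string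
instance (string : String) (out : String) : Decidable (Spec_solution string out) := by unfold Spec_solution; infer_instance

-- ===== CLAIM (what is proved, stated in full; the proofs are below) =====
def Claim_equal_solution : Prop := ∀ (string : String), Dom_solution string → Pre_solution string → Spec_solution string (solution string)

-- ===== LEMMAS AND PROOFS =====

-- the B fold computes (total + digit sum, letters ++ non-digits), by one induction
theorem pvFoldB (ts : List Char) : ∀ (t : Int) (L : List Char),
    ts.foldl pvStepB (t, L)
      = (t + ((ts.filter (fun c => decide (c ≤ '9'))).map pvIntC).sum,
         L ++ ts.filter (fun c => !decide (c ≤ '9'))) := by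
  induction ts with
  | nil => intro t L; simp
  | cons c cs ih =>
    intro t L
    by_cases h : c ≤ '9' <;>
      simp [pvStepB, h, ih, add_assoc, List.append_assoc]

theorem char_le_iff (a : Char) : a ≤ '9' ↔ a.toNat ≤ 57 := by
  constructor <;> intro h
  · exact Nat.le_trans (Char.le_def.mp h) (by decide)
  · exact Char.le_def.mpr (Nat.le_trans h (by decide))

-- sorted splits across the digit/letter partition (stable sort of id keys; duplicates are equal)
theorem pvSortedSplit (ts : List Char) :
    PySem.List.sorted ts (fun c => c) false
      = PySem.List.sorted (ts.filter (fun c => decide (c ≤ '9'))) (fun c => c) false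
        ++ PySem.List.sorted (ts.filter (fun c => !decide (c ≤ '9'))) (fun c => c) false := by
  apply (PySem.List.eq_of_perm_of_pairwise_le_of_injective (fun c : Char => c)
    (fun _ _ h => h) ?_ ?_ ?_).symm
  · exact ((PySem.List.sorted_perm _ _ _).append (PySem.List.sorted_perm _ _ _)).trans
      ((List.filter_append_perm (fun c => decide (c ≤ '9')) ts).trans
        (PySem.List.sorted_perm ts (fun c => c) false).symm)
  · rw [List.pairwise_append]
    refine ⟨PySem.List.sorted_pairwise _ _, PySem.List.sorted_pairwise _ _, ?_⟩
    intro a ha b hb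
    rw [PySem.List.mem_sorted] at ha hb
    have ha' : a ≤ '9' := by
      have := List.of_mem_filter ha; simpa using this
    have hb' : ¬ b ≤ '9' := by
      have := List.of_mem_filter hb; simpa using this
    exact le_trans ha' (le_of_lt (lt_of_not_ge hb'))
  · exact PySem.List.sorted_pairwise _ _

-- A's loop over (digits ++ letters): collects exactly the digits
theorem pvNumsA_append (l1 l2 : List Char)
    (h1 : ∀ c ∈ l1, c.toNat ≤ 57) (h2 : ∀ c ∈ l2, 57 < c.toNat) :
    pvNumsA (l1 ++ l2) = l1.map pvIntC := by
  induction l1 with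
  | nil =>
    cases l2 with
    | nil => rfl
    | cons c cs => simp [pvNumsA, h2 c (by simp)]
  | cons c cs ih =>
    have hc : ¬ 57 < c.toNat := not_lt.mpr (h1 c (by simp))
    simp [pvNumsA, hc, ih (fun x hx => h1 x (by simp [hx]))]

-- ===== VERDICT (by name: the statement is the Claim_ definition above) =====
theorem solution_spec : Claim_equal_solution := by
  intro s _ _
  unfold Spec_solution solution solution_alt
  dsimp only
  have h1 : ∀ c ∈ PySem.List.sorted (s.toList.filter (fun c => decide (c ≤ '9')))
      (fun c => c) false, c.toNat ≤ 57 := by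
    intro c hc
    rw [PySem.List.mem_sorted] at hc
    exact (char_le_iff c).mp (by simpa using List.of_mem_filter hc)
  have h2 : ∀ c ∈ PySem.List.sorted (s.toList.filter (fun c => !decide (c ≤ '9')))
      (fun c => c) false, 57 < c.toNat := by
    intro c hc
    rw [PySem.List.mem_sorted] at hc
    exact lt_of_not_ge (fun h => by simpa [(char_le_iff c).mpr h] using List.of_mem_filter hc)
  have hsum : ((PySem.List.sorted (s.toList.filter (fun c => decide (c ≤ '9')))
        (fun c => c) false).map pvIntC).sum
      = ((s.toList.filter (fun c => decide (c ≤ '9'))).map pvIntC).sum :=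
    ((PySem.List.sorted_perm _ (fun c : Char => c) false).map pvIntC).sum_eq
  rw [pvSortedSplit s.toList, pvNumsA_append _ _ h1 h2, pvFoldB s.toList 0 []]
  simp [hsum]
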